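-- pv_equiv track=rewrite | github.com/voliol/DF-Modloader | raw_handler.py | split_lines_into_tokens
-- ===== SOURCE A (Python) =====
-- def split_lines_into_tokens(lines):
--     # does what it sounds like, splits lines (a list of strings, such as from file.readlines()) into tokens,
--     # discarding comments along the way
--     token_list = []
--
--     file_string = "".join(lines)
--     reading_mode = "comments"
--     token = ""
--     args = ""
--     # just goes through each of the characters in the file, switching "reading_mode" when necessary.
--     for c in file_string:
--         if reading_mode == "comments":
--             if c == "[":
--                 reading_mode = "token"
--         elif reading_mode == "token":
--             if c == ":":
--                 reading_mode = "args"
--             elif c == "]":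
--                 token_list.append([token])
--                 token = ""
--                 reading_mode = "comments"
--             else:
--                 token += c
--         elif reading_mode == "args":
--             if c == "]":
--                 token_list.append([token] + args.split(":"))
--                 token = ""
--                 args = ""
--                 reading_mode = "comments"
--             else:
--                 args += c
--
--     return token_list
-- ===== SOURCE B (Python) =====
-- def split_lines_into_tokens(lines):
--     # scan with str.partition: jump to each '[' ... ']' pair and split the inside on ':'
--     out = []
--     rest = "".join(lines)
--     while True:
--         _, bra, rest = rest.partition("[")
--         if not bra:
--             return out
--         seg, ket, rest = rest.partition("]")
--         if not ket:
--             return out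
--         out.append(seg.split(":"))
-- ===== Notes on version B (the rewrite author's own statement) =====
-- stated objective: idiomatic
-- what changed: Replaces A's explicit three-mode character state machine (comments/token/args with mutable token and args buffers) by an idiomatic str.partition scan: repeatedly cut at the next '[' and the following ']' and split each captured segment on ':' in one go.
import Mathlib
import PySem

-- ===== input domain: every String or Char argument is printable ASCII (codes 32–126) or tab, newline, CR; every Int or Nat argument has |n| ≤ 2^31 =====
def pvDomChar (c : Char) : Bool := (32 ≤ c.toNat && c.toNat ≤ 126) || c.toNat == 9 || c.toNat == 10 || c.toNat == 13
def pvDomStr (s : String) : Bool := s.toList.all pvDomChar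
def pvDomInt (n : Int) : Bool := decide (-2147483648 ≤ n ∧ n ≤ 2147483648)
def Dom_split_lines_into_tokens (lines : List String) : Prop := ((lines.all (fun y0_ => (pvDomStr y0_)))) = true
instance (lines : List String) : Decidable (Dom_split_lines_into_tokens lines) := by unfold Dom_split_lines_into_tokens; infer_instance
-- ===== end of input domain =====

-- B replaces A's three-mode character state machine by an idiomatic scan with str.partition
-- (jump to the next '[', cut at the next ']', split the inside on ':'); objective: idiomatic, same O(n) cost.

-- ===== PORT A =====
inductive PvMode
  | comments | token | args
deriving DecidableEq, Repr

-- one step of A's for-loop over the characters; state = (token_list, reading_mode, token, args)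
def pvStepA (st : List (List String) × PvMode × List Char × List Char) (c : Char) :
    List (List String) × PvMode × List Char × List Char :=
  match st with
  | (tl, PvMode.comments, t, a) =>
      if c = '[' then (tl, PvMode.token, t, a) else (tl, PvMode.comments, t, a)
  | (tl, PvMode.token, t, a) =>
      if c = ':' then (tl, PvMode.args, t, a)
      else if c = ']' then (tl ++ [[String.ofList t]], PvMode.comments, [], a)
      else (tl, PvMode.token, t ++ [c], a)
  | (tl, PvMode.args, t, a) =>
      if c = ']' then
        (tl ++ [[String.ofList t] ++ (PySem.Chars.splitOn a [':']).map String.ofList],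
         PvMode.comments, [], [])
      else (tl, PvMode.args, t, a ++ [c])

-- "".join(lines) is the concatenation of the lines' characters ((lines.map String.toList).flatten)
def split_lines_into_tokens (lines : List String) : List (List String) :=
  (((lines.map String.toList).flatten).foldl pvStepA ([], PvMode.comments, [], [])).1

-- ===== PORT B =====
-- exact port of str.partition with a one-char separator: (part before, part after) the FIRST
-- occurrence of sep; none exactly when Python's partition returns an empty middle (sep absent)
def pvPartition (cs : List Char) (sep : Char) : Option (List Char × List Char) :=
  match cs with
  | [] => none
  | c :: rest =>
      if c = sep then some ([], rest)
      else (pvPartition rest sep).map (fun pq => (c :: pq.1, pq.2))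

lemma pvPartition_length (cs : List Char) (sep : Char) (pq : List Char × List Char)
    (h : pvPartition cs sep = some pq) : pq.2.length < cs.length := by
  induction cs generalizing pq with
  | nil => simp [pvPartition] at h
  | cons c rest ih =>
    simp only [pvPartition] at h
    split_ifs at h with hc
    · cases h; simp
    · cases hrec : pvPartition rest sep with
      | none => rw [hrec] at h; simp at h
      | some pq' =>
        rw [hrec] at h
        simp only [Option.map_some] at h
        cases h
        have := ih pq' hrec
        simpa using Nat.lt_succ_of_lt this

-- Source B's while-loop: collect the bracketed segments of rest
def pvSegs (rest : List Char) : List (List Char) :=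
  match h1 : pvPartition rest '[' with
  | none => []
  | some (_, rest1) =>
    match h2 : pvPartition rest1 ']' with
    | none => []
    | some (seg, rest2) => seg :: pvSegs rest2
termination_by rest.length
decreasing_by
  exact Nat.lt_trans (pvPartition_length rest1 ']' (seg, rest2) h2)
    (pvPartition_length rest '[' _ h1)

def split_lines_into_tokens_alt (lines : List String) : List (List String) :=
  (pvSegs ((lines.map String.toList).flatten)).map
    (fun seg => (PySem.Chars.splitOn seg [':']).map String.ofList)

-- ===== PRECONDITION & SPEC =====
def Spec_split_lines_into_tokens (lines : List String) (out : List (List String)) : Prop :=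
  out = split_lines_into_tokens_alt lines
instance (lines : List String) (out : List (List String)) :
    Decidable (Spec_split_lines_into_tokens lines out) := by
  unfold Spec_split_lines_into_tokens; infer_instance

-- ===== CLAIM =====
def Claim_equal_split_lines_into_tokens : Prop :=
  ∀ (lines : List String), Dom_split_lines_into_tokens lines →
    Spec_split_lines_into_tokens lines (split_lines_into_tokens lines)

-- ===== LEMMAS AND PROOFS =====

-- structural characterization of Python's str.split(":") (PySem.Chars.splitOn · [':'])
def pvSplitC : List Char → List (List Char)
  | [] => [[]]
  | c :: cs => if c = ':' then [] :: pvSplitC cs else (pvSplitC cs).modifyHead (c :: ·)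

lemma pvSplitC_ne_nil (l : List Char) : pvSplitC l ≠ [] := by
  induction l with
  | nil => simp [pvSplitC]
  | cons c cs ih =>
    simp only [pvSplitC]
    split_ifs
    · simp
    · cases h : pvSplitC cs with
      | nil => exact absurd h ih
      | cons x xs => simp

lemma pvSplitOn_go_eq (fuel : Nat) (l cur : List Char) (acc : List (List Char))
    (hf : l.length ≤ fuel) :
    PySem.Chars.splitOn.go [':'] fuel l cur acc
      = acc.reverse ++ (pvSplitC l).modifyHead (cur.reverse ++ ·) := by
  induction fuel generalizing l cur acc with
  | zero =>
    have : l = [] := List.length_eq_zero_iff.mp (Nat.le_zero.mp hf)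
    subst this
    simp [PySem.Chars.splitOn.go, pvSplitC]
  | succ fuel ih =>
    cases l with
    | nil => simp [PySem.Chars.splitOn.go, pvSplitC]
    | cons c rest =>
      simp only [PySem.Chars.splitOn.go]
      by_cases hc : c = ':'
      · subst hc
        have hpre : List.isPrefixOf [':'] (':' :: rest) = true := by
          simp [List.isPrefixOf]
        rw [if_pos hpre]
        simp only [List.length_cons] at hf
        simp only [List.length_singleton, List.drop_succ_cons, List.drop_zero]
        rw [ih rest [] (cur.reverse :: acc) (Nat.le_of_succ_le_succ hf)]
        cases h : pvSplitC rest with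
        | nil => exact absurd h (pvSplitC_ne_nil rest)
        | cons x xs => simp [pvSplitC, h]
      · have hpre : List.isPrefixOf [':'] (c :: rest) = false := by
          simp [List.isPrefixOf]
          exact fun h => absurd h.symm hc
        rw [if_neg (by simp [hpre])]
        simp only [List.length_cons] at hf
        rw [ih rest (c :: cur) acc (Nat.le_of_succ_le_succ hf)]
        simp only [pvSplitC, if_neg hc]
        cases h : pvSplitC rest with
        | nil => exact absurd h (pvSplitC_ne_nil rest)
        | cons x xs => simp

lemma pvSplitOn_eq (l : List Char) :
    PySem.Chars.splitOn l [':'] = pvSplitC l := by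
  have h := pvSplitOn_go_eq (l.length + 1) l [] [] (Nat.le_succ _)
  cases hs : pvSplitC l with
  | nil => exact absurd hs (pvSplitC_ne_nil l)
  | cons x xs =>
    rw [hs] at h
    simpa [PySem.Chars.splitOn, hs] using h

lemma pvSplitC_no_colon (t : List Char) (h : ':' ∉ t) : pvSplitC t = [t] := by
  induction t with
  | nil => simp [pvSplitC]
  | cons c cs ih =>
    simp only [List.mem_cons, not_or] at h
    simp [pvSplitC, Ne.symm h.1, ih h.2]

lemma pvSplitC_append_colon (t a : List Char) (h : ':' ∉ t) :
    pvSplitC (t ++ ':' :: a) = t :: pvSplitC a := by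
  induction t with
  | nil => simp [pvSplitC]
  | cons c cs ih =>
    simp only [List.mem_cons, not_or] at h
    simp [pvSplitC, Ne.symm h.1, ih h.2]

-- the segment -> token-row map of B
def pvMS (seg : List Char) : List String := (PySem.Chars.splitOn seg [':']).map String.ofList

lemma pvMS_no_colon (t : List Char) (h : ':' ∉ t) : pvMS t = [String.ofList t] := by
  simp [pvMS, pvSplitOn_eq, pvSplitC_no_colon t h]

lemma pvMS_colon (t a : List Char) (h : ':' ∉ t) :
    pvMS (t ++ ':' :: a) = String.ofList t :: (PySem.Chars.splitOn a [':']).map String.ofList := by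
  simp [pvMS, pvSplitOn_eq, pvSplitC_append_colon t a h]

lemma pvSegs_none (rest : List Char) (h : pvPartition rest '[' = none) :
    pvSegs rest = [] := by
  rw [pvSegs]
  split <;> simp_all

lemma pvSegs_some (rest f r1 : List Char) (h : pvPartition rest '[' = some (f, r1)) :
    pvSegs rest = match pvPartition r1 ']' with
      | none => []
      | some (seg, rest2) => seg :: pvSegs rest2 := by
  rw [pvSegs]
  split
  · simp_all
  · (try simp_all)
    split <;> simp_all

lemma pvSegs_bracket (cs : List Char) :
    pvSegs ('[' :: cs) = match pvPartition cs ']' with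
      | none => []
      | some (seg, rest2) => seg :: pvSegs rest2 := by
  exact pvSegs_some ('[' :: cs) [] cs (by simp [pvPartition])

lemma pvSegs_skip (c : Char) (cs : List Char) (h : c ≠ '[') :
    pvSegs (c :: cs) = pvSegs cs := by
  cases hp : pvPartition cs '[' with
  | none =>
    rw [pvSegs_none cs hp, pvSegs_none (c :: cs) (by simp [pvPartition, if_neg h, hp])]
  | some pq =>
    cases pq with
    | mk f r1 =>
      rw [pvSegs_some cs f r1 hp,
        pvSegs_some (c :: cs) (c :: f) r1 (by simp [pvPartition, if_neg h, hp])]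

-- the main simultaneous invariant for A's fold, by strong induction on the character list
lemma pvMain (n : Nat) : ∀ (cs : List Char), cs.length ≤ n →
    (∀ tl, (cs.foldl pvStepA (tl, PvMode.comments, [], [])).1
        = tl ++ (pvSegs cs).map pvMS)
  ∧ (∀ tl t, ':' ∉ t → (cs.foldl pvStepA (tl, PvMode.token, t, [])).1
        = tl ++ match pvPartition cs ']' with
          | none => []
          | some (p, q) => pvMS (t ++ p) :: (pvSegs q).map pvMS)
  ∧ (∀ tl t a, ':' ∉ t → (cs.foldl pvStepA (tl, PvMode.args, t, a)).1
        = tl ++ match pvPartition cs ']' with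
          | none => []
          | some (p, q) => pvMS (t ++ ':' :: (a ++ p)) :: (pvSegs q).map pvMS) := by
  induction n with
  | zero =>
    intro cs hcs
    have : cs = [] := List.length_eq_zero_iff.mp (Nat.le_zero.mp hcs)
    subst this
    refine ⟨?_, ?_, ?_⟩ <;> intros <;>
      simp [pvSegs_none [] (rfl : pvPartition [] '[' = none), pvPartition]
  | succ n ih =>
    intro cs hcs
    cases cs with
    | nil =>
      refine ⟨?_, ?_, ?_⟩ <;> intros <;>
        simp [pvSegs_none [] (rfl : pvPartition [] '[' = none), pvPartition]
    | cons c rest =>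
      simp only [List.length_cons] at hcs
      have hrest := Nat.le_of_succ_le_succ hcs
      refine ⟨?_, ?_, ?_⟩
      · -- comments mode
        intro tl
        by_cases hc : c = '['
        · subst hc
          rw [List.foldl_cons]
          simp only [pvStepA, reduceIte]
          rw [(ih rest hrest).2.1 tl [] (by simp), pvSegs_bracket]
          cases hp : pvPartition rest ']' with
          | none => simp
          | some pq => cases pq; simp
        · rw [List.foldl_cons]
          simp only [pvStepA, if_neg hc]
          rw [(ih rest hrest).1 tl, pvSegs_skip c rest hc]
      · -- token mode
        intro tl t ht
        rw [List.foldl_cons]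
        by_cases hcol : c = ':'
        · subst hcol
          simp only [pvStepA, Char.reduceEq, reduceIte]
          rw [(ih rest hrest).2.2 tl t [] ht]
          simp only [pvPartition, Char.reduceEq, reduceIte]
          cases hp : pvPartition rest ']' with
          | none => simp
          | some pq => cases pq; simp
        · by_cases hket : c = ']'
          · subst hket
            simp only [pvStepA, Char.reduceEq, reduceIte]
            rw [(ih rest hrest).1 (tl ++ [[String.ofList t]])]
            simp only [pvPartition, reduceIte, List.append_nil]
            rw [pvMS_no_colon t ht]
            simp
          · simp only [pvStepA, if_neg hcol, if_neg hket]
            have ht' : ':' ∉ t ++ [c] := by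
              simp [ht]
              exact fun h => absurd h.symm hcol
            rw [(ih rest hrest).2.1 tl (t ++ [c]) ht']
            simp only [pvPartition, if_neg hket]
            cases hp : pvPartition rest ']' with
            | none => simp
            | some pq => cases pq; simp
      · -- args mode
        intro tl t a ht
        rw [List.foldl_cons]
        by_cases hket : c = ']'
        · subst hket
          simp only [pvStepA, reduceIte]
          rw [(ih rest hrest).1
            (tl ++ [[String.ofList t] ++ (PySem.Chars.splitOn a [':']).map String.ofList])]
          simp only [pvPartition, reduceIte]
          simp only [List.append_nil]
          rw [pvMS_colon t a ht]
          simp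
        · simp only [pvStepA, if_neg hket]
          rw [(ih rest hrest).2.2 tl t (a ++ [c]) ht]
          simp only [pvPartition, if_neg hket]
          cases hp : pvPartition rest ']' with
          | none => simp
          | some pq => cases pq; simp

-- ===== VERDICT =====
theorem split_lines_into_tokens_spec : Claim_equal_split_lines_into_tokens := by
  intro lines _
  unfold Spec_split_lines_into_tokens split_lines_into_tokens split_lines_into_tokens_alt
  rw [((pvMain ((lines.map String.toList).flatten).length)
      ((lines.map String.toList).flatten) (Nat.le_refl _)).1 []]
  simp [pvMS]
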